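-- pv_equiv track=rewrite | github.com/trabajo-profesional-fiuba/assignment-service | src/model/formatter/flow_formatter.py | __get_tutors
-- ===== SOURCE A (Python) =====
-- def __get_tutors(topics: dict, groups: dict):
--     """Returns a dictionary with tutors as keys and assigned groups as values."""
--     tutors = {}
--     for topic, tutor in topics.items():
--         assigned_groups = []
--         for group, value in groups.items():
--             if value == topic:
--                 assigned_groups.append(group)
--         tutors[tutor] = assigned_groups
--     return tutors
-- ===== SOURCE B (Python) =====
-- def __get_tutors(topics: dict, groups: dict):
--     """Returns a dictionary with tutors as keys and assigned groups as values."""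
--     buckets = {}
--     for group, value in groups.items():
--         buckets.setdefault(value, []).append(group)
--     return {tutor: list(buckets.get(topic, [])) for topic, tutor in topics.items()}
-- ===== Notes on version B (the rewrite author's own statement) =====
-- stated objective: faster
-- what changed: Replaces A's per-topic rescan of all groups with a single pass that buckets groups by value in a dict, then one O(1) lookup per topic.
import Mathlib
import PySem

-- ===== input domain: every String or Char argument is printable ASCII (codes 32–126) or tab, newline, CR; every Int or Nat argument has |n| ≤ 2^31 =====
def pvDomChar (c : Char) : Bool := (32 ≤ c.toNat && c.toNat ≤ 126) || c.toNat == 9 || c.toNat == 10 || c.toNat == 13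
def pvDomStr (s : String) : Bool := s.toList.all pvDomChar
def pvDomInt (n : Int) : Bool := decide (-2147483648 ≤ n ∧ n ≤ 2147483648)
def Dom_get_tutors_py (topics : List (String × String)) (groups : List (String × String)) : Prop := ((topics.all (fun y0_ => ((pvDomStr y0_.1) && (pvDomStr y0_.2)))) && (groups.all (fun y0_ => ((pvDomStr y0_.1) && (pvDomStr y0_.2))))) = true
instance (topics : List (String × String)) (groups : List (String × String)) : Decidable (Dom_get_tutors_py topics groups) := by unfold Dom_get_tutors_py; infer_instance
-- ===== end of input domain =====

-- B buckets the groups by value in ONE pass and looks each topic up, replacing A's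
-- per-topic rescan of all groups: O(T+G) instead of O(T*G); return value unchanged.

-- ===== PORT A =====
-- for topic, tutor in topics: assigned = [g for g, v in groups if v == topic]; tutors[tutor] = assigned
def get_tutors_py (topics : List (String × String)) (groups : List (String × String)) : List (String × List String) :=
  (topics.foldl
    (fun (tutors : PySem.Dict String (List String)) tp =>
      tutors.insert tp.2
        (groups.foldl (fun acc gv => if gv.2 == tp.1 then acc ++ [gv.1] else acc) []))
    PySem.Dict.empty).items

-- ===== PORT B =====
-- buckets.setdefault(value, []).append(group), one pass over groups
def pvBuckets (groups : List (String × String)) : PySem.Dict String (List String) :=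
  groups.foldl (fun d gv => d.modify gv.2 [] (· ++ [gv.1])) PySem.Dict.empty

def get_tutors_py_alt (topics : List (String × String)) (groups : List (String × String)) : List (String × List String) :=
  let buckets := pvBuckets groups
  (topics.foldl
    (fun (tutors : PySem.Dict String (List String)) tp =>
      tutors.insert tp.2 (buckets.getD tp.1 []))
    PySem.Dict.empty).items

-- ===== PRECONDITION & SPEC =====
def Spec_get_tutors_py (topics : List (String × String)) (groups : List (String × String)) (out : List (String × List String)) : Prop := out = get_tutors_py_alt topics groups
instance (topics : List (String × String)) (groups : List (String × String)) (out : List (String × List String)) : Decidable (Spec_get_tutors_py topics groups out) := by unfold Spec_get_tutors_py; infer_instance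

-- ===== CLAIM (what is proved, stated in full; the proofs are below) =====
def Claim_equal_get_tutors_py : Prop := ∀ (topics : List (String × String)) (groups : List (String × String)), Dom_get_tutors_py topics groups → Spec_get_tutors_py topics groups (get_tutors_py topics groups)

-- ===== LEMMAS AND PROOFS =====

-- B's grouping loop keyed on gv.2: looking up t gives the groups whose value is t
theorem foldl_modify_snd_getD (l : List (String × String)) (d : PySem.Dict String (List String)) (t : String) :
    (l.foldl (fun d gv => d.modify gv.2 [] (· ++ [gv.1])) d).getD t [] =
      d.getD t [] ++ (l.filter (fun gv => gv.2 == t)).map (·.1) := by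
  induction l generalizing d with
  | nil => simp
  | cons gv l ih =>
    simp only [List.foldl_cons, ih, List.filter_cons, PySem.Dict.getD_modify]
    by_cases h : t = gv.2
    · subst h; simp
    · simp [h, Ne.symm h, beq_iff_eq]

-- looking a topic up in B's bucket dict gives exactly A's inner filtering loop
theorem pvBuckets_getD (groups : List (String × String)) (t : String) :
    (pvBuckets groups).getD t [] =
      groups.foldl (fun acc gv => if gv.2 == t then acc ++ [gv.1] else acc) [] := by
  unfold pvBuckets
  rw [foldl_modify_snd_getD, PySem.List.foldl_append_if]
  simp

-- ===== VERDICT (by name: the statement is the Claim_ definition above) =====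
theorem get_tutors_py_spec : Claim_equal_get_tutors_py := by
  intro topics groups _
  unfold Spec_get_tutors_py get_tutors_py get_tutors_py_alt
  simp only [pvBuckets_getD]
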